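-- pv_equiv track=rewrite | github.com/fredaas/dotfiles | sublime/plugins/pywrap/pywrap.py | match_token
-- ===== SOURCE A (Python) =====
-- def match_token(s):
--     s = s.lstrip()
--     l = len(s)
--     for i in range(l):
--         # Only check the first two characters
--         if i >= 2:
--             break
--         c = s[i]
--         if c == "-":
--             return c
--         if c == "*":
--             return c
--         if c == ">":
--             if i + 1 < l and c == s[i + 1]:
--                 return ">>"
--             return c
--         if c == "#":
--             return c
--         if c == "/":
--             if i + 1 < l and c == s[i + 1]:
--                 return "//"
--         if c == "~":
--             return c
--     return ""
-- ===== SOURCE B (Python) =====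
-- def _step(state, c):
--     # DFA transition: returns ("out", result) to emit, or ("go", state). c is None at end of input.
--     if state == "GT":
--         return ("out", ">>" if c == ">" else ">")
--     if state == "SL1":
--         return ("out", "//" if c == "/" else "")
--     if state == "SL0":
--         if c == "/":
--             return ("out", "//")
--         if c is None:
--             return ("out", "")
--         state = "S1"  # a lone '/' at position 0: this char starts a position-1 token
--     if c is None:
--         return ("out", "")
--     if c in "-*#~":
--         return ("out", c)
--     if c == ">":
--         return ("go", "GT")
--     if c == "/":
--         return ("go", "SL0" if state == "S0" else "SL1")
--     return ("go", "S1") if state == "S0" else ("out", "")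
--
--
-- def match_token(s):
--     # Finite-state matcher: feed the first three characters of the stripped
--     # string (plus an end marker) through a 5-state DFA, no indexing/lookahead.
--     t = s.lstrip()
--     state = "S0"
--     for c in list(t[:3]) + [None]:
--         act, v = _step(state, c)
--         if act == "out":
--             return v
--         state = v
-- ===== Notes on version B (the rewrite author's own statement) =====
-- stated objective: alternative
-- what changed: Replaced A's indexed loop with s[i+1] lookahead by an explicit 5-state DFA that consumes the first three stripped characters plus an end marker one at a time through a transition function (no indexing, no lookahead).
import Mathlib
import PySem

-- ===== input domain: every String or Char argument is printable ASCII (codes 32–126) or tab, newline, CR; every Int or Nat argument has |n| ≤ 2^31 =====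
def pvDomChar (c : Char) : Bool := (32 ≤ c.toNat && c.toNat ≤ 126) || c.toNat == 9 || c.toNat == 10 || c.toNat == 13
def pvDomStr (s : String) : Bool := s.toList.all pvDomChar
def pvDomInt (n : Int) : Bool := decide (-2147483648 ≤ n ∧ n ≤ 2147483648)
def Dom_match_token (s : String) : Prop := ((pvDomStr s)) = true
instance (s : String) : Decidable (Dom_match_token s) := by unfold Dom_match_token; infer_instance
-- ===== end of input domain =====

-- B replaces A's indexed loop with s[i+1] lookahead by an explicit 5-state DFA fed the first
-- three stripped characters plus an end marker, one at a time; same return value, proved equal.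

-- ===== PORT A =====
-- the loop body of A over the index list range(l); every i drawn from range(l) is in range, and the
-- lookahead s[i+1] is only read under the guard i+1 < l, so pyGetD's default is never read
-- (it stands for Python's s[i], exact here)
def matchLoopA (s : List Char) (l : Int) : List Int → String
  | [] => ""
  | i :: rest =>
    if i ≥ 2 then ""                                   -- break
    else
      let c := PySem.List.pyGetD s i ' '
      if c = '-' then String.ofList [c]
      else if c = '*' then String.ofList [c]
      else if c = '>' then
        (if i + 1 < l ∧ c = PySem.List.pyGetD s (i + 1) ' ' then ">>" else String.ofList [c])
      else if c = '#' then String.ofList [c]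
      else if c = '/' then
        (if i + 1 < l ∧ c = PySem.List.pyGetD s (i + 1) ' ' then "//" else matchLoopA s l rest)
      else if c = '~' then String.ofList [c]
      else matchLoopA s l rest

def match_token (s : String) : String :=
  let t := PySem.Str.lstrip s
  let l : Int := PySem.Str.len t
  matchLoopA t.toList l (PySem.List.pyRange 0 l 1)

-- ===== PORT B =====
-- the DFA states of Source B's _step ("S0","S1","GT","SL0","SL1")
inductive PvSt | S0 | S1 | GT | SL0 | SL1
deriving DecidableEq, Repr

-- _step of Source B: ("out", r) = .inl r, ("go", st) = .inr st; c = none is Python's None end marker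
def pvStep (st : PvSt) (c : Option Char) : String ⊕ PvSt :=
  if st = .GT then .inl (if c = some '>' then ">>" else ">")
  else if st = .SL1 then .inl (if c = some '/' then "//" else "")
  else
    -- shared S0/S1 body (Python reassigns state = "S1" in the SL0 fall-through)
    let body : PvSt → String ⊕ PvSt := fun st =>
      match c with
      | none => .inl ""
      | some ch =>
        if ch = '-' ∨ ch = '*' ∨ ch = '#' ∨ ch = '~' then .inl (String.ofList [ch])
        else if ch = '>' then .inr .GT
        else if ch = '/' then .inr (if st = .S0 then .SL0 else .SL1)
        else if st = .S0 then .inr .S1 else .inl ""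
    if st = .SL0 then
      if c = some '/' then .inl "//"
      else if c = none then .inl ""
      else body .S1
    else body st

-- the for-loop of Source B's match_token; [] = Python falling off the loop (unreachable: the end
-- marker always emits)
def pvRun : PvSt → List (Option Char) → String
  | _, [] => ""
  | st, c :: rest =>
    match pvStep st c with
    | .inl out => out
    | .inr st' => pvRun st' rest

def match_token_alt (s : String) : String :=
  let t := (PySem.Str.lstrip s).toList
  pvRun .S0 ((t.take 3).map some ++ [none])

-- ===== PRECONDITION & SPEC =====
def Spec_match_token (s : String) (out : String) : Prop := out = match_token_alt s
instance (s : String) (out : String) : Decidable (Spec_match_token s out) := by unfold Spec_match_token; infer_instance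

-- ===== CLAIM (what is proved, stated in full; the proofs are below) =====
def Claim_equal_match_token : Prop := ∀ (s : String), Dom_match_token s → Spec_match_token s (match_token s)

-- ===== LEMMAS AND PROOFS =====

-- from index 2 on, A's loop always breaks out with ""
lemma matchLoopA_tail (s : List Char) (l : Int) :
    matchLoopA s l (PySem.List.pyRange 2 l 1) = "" := by
  by_cases h : l ≤ 2
  · rw [PySem.List.pyRange_one_eq_nil h]; simp [matchLoopA]
  · rw [PySem.List.pyRange_one_cons (by omega)]
    simp [matchLoopA]

-- A's two-iteration loop equals B's DFA run on the stripped char list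
-- pvStep/pvRun facts used to drive the DFA run in the proof
lemma step_S0_other {c : Char} (h1 : c ≠ '-') (h2 : c ≠ '*') (h3 : c ≠ '>') (h4 : c ≠ '#')
    (h5 : c ≠ '~') (h6 : c ≠ '/') : pvStep .S0 (some c) = .inr .S1 := by
  simp [pvStep, h1, h2, h3, h4, h5, h6]

lemma step_S1_other {c : Char} (h1 : c ≠ '-') (h2 : c ≠ '*') (h3 : c ≠ '>') (h4 : c ≠ '#')
    (h5 : c ≠ '~') (h6 : c ≠ '/') : pvStep .S1 (some c) = .inl "" := by
  simp [pvStep, h1, h2, h3, h4, h5, h6]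

lemma step_SL0_other {c : Char} (h6 : c ≠ '/') :
    pvStep .SL0 (some c) = pvStep .S1 (some c) := by
  simp [pvStep, h6]

lemma pvRun_out {st : PvSt} {c : Option Char} {rest : List (Option Char)} {out : String}
    (h : pvStep st c = .inl out) : pvRun st (c :: rest) = out := by
  simp [pvRun, h]

lemma pvRun_go {st st' : PvSt} {c : Option Char} {rest : List (Option Char)}
    (h : pvStep st c = .inr st') : pvRun st (c :: rest) = pvRun st' rest := by
  simp [pvRun, h]

-- the DFA from state S1: the position-1 token with one-element lookahead x
lemma pvRun_S1_cons (d : Char) (x : Option Char) (r : List (Option Char)) :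
    pvRun .S1 (some d :: x :: r) =
      if d = '-' ∨ d = '*' ∨ d = '#' ∨ d = '~' then String.ofList [d]
      else if d = '>' then (if x = some '>' then ">>" else ">")
      else if d = '/' then (if x = some '/' then "//" else "")
      else "" := by
  by_cases hT : d = '-' ∨ d = '*' ∨ d = '#' ∨ d = '~'
  · rw [if_pos hT]
    obtain h | h | h | h := hT <;> subst h <;> rw [pvRun_out (by rfl)]
  · rw [if_neg hT]
    push_neg at hT
    obtain ⟨h1, h2, h4, h5⟩ := hT
    by_cases h3 : d = '>'
    · subst h3
      rw [pvRun_go (show pvStep .S1 (some '>') = .inr .GT from rfl), pvRun_out (by rfl)]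
      simp
    · by_cases h6 : d = '/'
      · subst h6
        rw [pvRun_go (show pvStep .S1 (some '/') = .inr .SL1 from rfl), pvRun_out (by rfl)]
        simp [h3]
      · rw [pvRun_out (step_S1_other h1 h2 h3 h4 h5 h6)]
        simp [h3, h6]

-- after a lone '/' the DFA continues exactly as from S1 (unless the next char is '/')
lemma pvRun_SL0_eq_S1 (x : Option Char) (r : List (Option Char)) (h : x ≠ some '/') :
    pvRun .SL0 (x :: r) = pvRun .S1 (x :: r) := by
  match x with
  | none => rw [pvRun_out (by rfl), pvRun_out (by rfl)]
  | some ch =>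
    have hch : ch ≠ '/' := fun hc => h (by rw [hc])
    rcases hstep : pvStep .S1 (some ch) with out | st'
    · rw [pvRun_out ((step_SL0_other hch).trans hstep), pvRun_out hstep]
    · rw [pvRun_go ((step_SL0_other hch).trans hstep), pvRun_go hstep]

-- the DFA from the start state: the position-0 token with lookahead d, falling through to S1
lemma pvRun_S0_cons (c : Char) (d x : Option Char) (r : List (Option Char)) :
    pvRun .S0 (some c :: d :: x :: r) =
      if c = '-' ∨ c = '*' ∨ c = '#' ∨ c = '~' then String.ofList [c]
      else if c = '>' then (if d = some '>' then ">>" else ">")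
      else if c = '/' then (if d = some '/' then "//" else pvRun .S1 (d :: x :: r))
      else pvRun .S1 (d :: x :: r) := by
  by_cases hT : c = '-' ∨ c = '*' ∨ c = '#' ∨ c = '~'
  · rw [if_pos hT]
    obtain h | h | h | h := hT <;> subst h <;> rw [pvRun_out (by rfl)]
  · rw [if_neg hT]
    push_neg at hT
    obtain ⟨h1, h2, h4, h5⟩ := hT
    by_cases h3 : c = '>'
    · subst h3
      rw [pvRun_go (show pvStep .S0 (some '>') = .inr .GT from rfl), pvRun_out (by rfl)]
      simp
    · by_cases h6 : c = '/'
      · subst h6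
        rw [pvRun_go (show pvStep .S0 (some '/') = .inr .SL0 from rfl)]
        by_cases hd : d = some '/'
        · subst hd
          rw [pvRun_out (by rfl)]
          simp [h3]
        · rw [pvRun_SL0_eq_S1 d (x :: r) hd]
          simp [h3, hd]
      · rw [pvRun_go (step_S0_other h1 h2 h3 h4 h5 h6)]
        simp [h3, h6]

set_option maxHeartbeats 1000000 in
lemma core (t : List Char) :
    matchLoopA t (t.length : Int) (PySem.List.pyRange 0 (t.length : Int) 1) =
      pvRun .S0 ((t.take 3).map some ++ [none]) := by
  match t with
  | [] => simp [PySem.List.pyRange_one_eq_nil, matchLoopA, pvRun, pvStep]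
  | [c] =>
    rw [show ((([c] : List Char).length : Int)) = 1 by simp,
        PySem.List.pyRange_one_cons (by omega), PySem.List.pyRange_one_eq_nil (by omega)]
    simp only [List.take, List.map, List.cons_append, List.nil_append]
    by_cases hQ : c = '-' ∨ c = '*' ∨ c = '>' ∨ c = '#' ∨ c = '~' ∨ c = '/'
    · obtain hc | hc | hc | hc | hc | hc := hQ <;> subst hc <;>
        simp [matchLoopA, pvRun, pvStep, PySem.List.pyGetD]
    · push_neg at hQ
      obtain ⟨h1, h2, h3, h4, h5, h6⟩ := hQ
      rw [pvRun_go (step_S0_other h1 h2 h3 h4 h5 h6), pvRun_out (by rfl)]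
      simp [matchLoopA, PySem.List.pyGetD, h1, h2, h3, h4, h5, h6]
  | c :: d :: rest =>
    rw [show (((c :: d :: rest : List Char).length : Int)) = (rest.length : Int) + 2 by simp; ring,
        PySem.List.pyRange_one_cons (by omega), PySem.List.pyRange_one_cons (by omega),
        show ((0 : Int) + 1 + 1) = 2 by ring]
    match rest with
    | [] =>
      simp only [List.take, List.map, List.cons_append, List.nil_append]
      rw [pvRun_S0_cons c (some d) none [], pvRun_S1_cons d none []]
      simp only [matchLoopA]
      norm_num [show PySem.List.pyGetD [c, d] 0 ' ' = c from rfl,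
        show PySem.List.pyGetD [c, d] 1 ' ' = d from rfl]
      by_cases h1 : c = '-'
      · subst h1; simp [matchLoopA, PySem.List.pyRange_one_eq_nil]
      · by_cases h2 : c = '*'
        · subst h2; simp [matchLoopA, PySem.List.pyRange_one_eq_nil]
        · by_cases h3 : c = '>'
          · subst h3
            by_cases hd : d = '>'
            · subst hd; simp [matchLoopA, PySem.List.pyRange_one_eq_nil]
            · simp [hd, Ne.symm hd, matchLoopA, PySem.List.pyRange_one_eq_nil]
          · by_cases h4 : c = '#'
            · subst h4; simp [matchLoopA, PySem.List.pyRange_one_eq_nil]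
            · by_cases h6 : c = '/'
              · subst h6
                by_cases hd : d = '/'
                · subst hd; simp [matchLoopA, PySem.List.pyRange_one_eq_nil]
                · simp only [if_neg h1, if_neg h2, if_neg h3, if_neg h4, if_neg hd,
                    show (('/' : Char) = '/') = True by simp, if_true,
                    show (('/' : Char) = '-' ∨ ('/' : Char) = '*' ∨ ('/' : Char) = '#' ∨ ('/' : Char) = '~') = False by simp, if_false]
                  by_cases hd1 : d = '-'
                  · subst hd1; simp [matchLoopA, PySem.List.pyRange_one_eq_nil, Ne.symm hd]
                  · by_cases hd2 : d = '*'
                    · subst hd2; simp [matchLoopA, PySem.List.pyRange_one_eq_nil, Ne.symm hd]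
                    · by_cases hd3 : d = '>'
                      · subst hd3
                        simp [matchLoopA, PySem.List.pyRange_one_eq_nil, Ne.symm hd]
                      · by_cases hd4 : d = '#'
                        · subst hd4; simp [matchLoopA, PySem.List.pyRange_one_eq_nil, Ne.symm hd]
                        · by_cases hd6 : d = '/'
                          · subst hd6
                            exact absurd rfl hd
                          · by_cases hd5 : d = '~'
                            · subst hd5; simp [hd1, hd2, hd3, hd4, Ne.symm hd, matchLoopA, PySem.List.pyRange_one_eq_nil]
                            · simp [hd1, hd2, hd3, hd4, hd5, hd6, Ne.symm hd, matchLoopA, PySem.List.pyRange_one_eq_nil]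
              · by_cases h5 : c = '~'
                · subst h5; simp [h1, h2, h3, h4, matchLoopA, PySem.List.pyRange_one_eq_nil]
                · simp only [if_neg h1, if_neg h2, if_neg h3, if_neg h4, if_neg h5, if_neg h6,
                    show (c = '-' ∨ c = '*' ∨ c = '#' ∨ c = '~') = False by simp [h1, h2, h4, h5], if_false]
                  by_cases hd1 : d = '-'
                  · subst hd1; simp [matchLoopA, PySem.List.pyRange_one_eq_nil]
                  · by_cases hd2 : d = '*'
                    · subst hd2; simp [matchLoopA, PySem.List.pyRange_one_eq_nil]
                    · by_cases hd3 : d = '>'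
                      · subst hd3
                        simp [matchLoopA, PySem.List.pyRange_one_eq_nil]
                      · by_cases hd4 : d = '#'
                        · subst hd4; simp [matchLoopA, PySem.List.pyRange_one_eq_nil]
                        · by_cases hd6 : d = '/'
                          · subst hd6
                            simp [matchLoopA, PySem.List.pyRange_one_eq_nil]
                          · by_cases hd5 : d = '~'
                            · subst hd5; simp [hd1, hd2, hd3, hd4, matchLoopA, PySem.List.pyRange_one_eq_nil]
                            · simp [hd1, hd2, hd3, hd4, hd5, hd6, matchLoopA, PySem.List.pyRange_one_eq_nil]
    | e :: rest' =>
      have htail := matchLoopA_tail (c :: d :: e :: rest') ((rest'.length : Int) + 1 + 2)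
      have ha : (1 : Int) < (rest'.length : Int) + 1 + 2 := by omega
      have hb : (2 : Int) < (rest'.length : Int) + 1 + 2 := by omega
      simp only [List.take, List.map, List.cons_append, List.nil_append]
      rw [pvRun_S0_cons c (some d) (some e) [none], pvRun_S1_cons d (some e) [none]]
      simp only [matchLoopA]
      norm_num [ha, hb,
        show PySem.List.pyGetD (c :: d :: e :: rest') 0 ' ' = c by simp [PySem.List.pyGetD_ofNat'],
        show PySem.List.pyGetD (c :: d :: e :: rest') 1 ' ' = d by simp [PySem.List.pyGetD_ofNat'],
        show PySem.List.pyGetD (c :: d :: e :: rest') 2 ' ' = e by simp [PySem.List.pyGetD_ofNat']]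
      by_cases h1 : c = '-'
      · subst h1; simp [htail, ha, hb]
      · by_cases h2 : c = '*'
        · subst h2; simp [htail, ha, hb]
        · by_cases h3 : c = '>'
          · subst h3
            by_cases hd : d = '>'
            · subst hd; simp [htail, ha, hb]
            · simp [hd, Ne.symm hd, htail, ha, hb]
          · by_cases h4 : c = '#'
            · subst h4; simp [htail, ha, hb]
            · by_cases h6 : c = '/'
              · subst h6
                by_cases hd : d = '/'
                · subst hd; simp [htail, ha, hb]
                · simp only [if_neg h1, if_neg h2, if_neg h3, if_neg h4, if_neg hd,
                    show (('/' : Char) = '/') = True by simp, if_true,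
                    show (('/' : Char) = '-' ∨ ('/' : Char) = '*' ∨ ('/' : Char) = '#' ∨ ('/' : Char) = '~') = False by simp, if_false]
                  by_cases hd1 : d = '-'
                  · subst hd1; simp [htail, ha, hb, Ne.symm hd]
                  · by_cases hd2 : d = '*'
                    · subst hd2; simp [htail, ha, hb, Ne.symm hd]
                    · by_cases hd3 : d = '>'
                      · subst hd3
                        by_cases he : e = '>'
                        · subst he; simp [htail, ha, hb, Ne.symm hd]
                        · simp [he, Ne.symm he, Ne.symm hd, htail, ha, hb]
                      · by_cases hd4 : d = '#'
                        · subst hd4; simp [htail, ha, hb, Ne.symm hd]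
                        · by_cases hd6 : d = '/'
                          · subst hd6
                            exact absurd rfl hd
                          · by_cases hd5 : d = '~'
                            · subst hd5; simp [hd1, hd2, hd3, hd4, Ne.symm hd, htail, ha, hb]
                            · simp [hd1, hd2, hd3, hd4, hd5, hd6, Ne.symm hd, htail, ha, hb]
              · by_cases h5 : c = '~'
                · subst h5; simp [h1, h2, h3, h4, htail, ha, hb]
                · simp only [if_neg h1, if_neg h2, if_neg h3, if_neg h4, if_neg h5, if_neg h6,
                    show (c = '-' ∨ c = '*' ∨ c = '#' ∨ c = '~') = False by simp [h1, h2, h4, h5], if_false]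
                  by_cases hd1 : d = '-'
                  · subst hd1; simp [htail, ha, hb]
                  · by_cases hd2 : d = '*'
                    · subst hd2; simp [htail, ha, hb]
                    · by_cases hd3 : d = '>'
                      · subst hd3
                        by_cases he : e = '>'
                        · subst he; simp [htail, ha, hb]
                        · simp [he, Ne.symm he, htail, ha, hb]
                      · by_cases hd4 : d = '#'
                        · subst hd4; simp [htail, ha, hb]
                        · by_cases hd6 : d = '/'
                          · subst hd6
                            by_cases he : e = '/'
                            · subst he; simp [htail, ha, hb]
                            · simp [he, Ne.symm he, htail, ha, hb]
                          · by_cases hd5 : d = '~'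
                            · subst hd5; simp [hd1, hd2, hd3, hd4, htail, ha, hb]
                            · simp [hd1, hd2, hd3, hd4, hd5, hd6, htail, ha, hb]


-- ===== VERDICT (by name: the statement is the Claim_ definition above) =====
theorem match_token_spec : Claim_equal_match_token := by
  intro s _
  unfold Spec_match_token match_token match_token_alt
  simpa [PySem.Str.len_eq] using core (PySem.Str.lstrip s).toList
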